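-- pv_equiv track=rewrite | github.com/momacs/pram | src/pram/entity.py | gen_dict
-- ===== SOURCE A (Python) =====
-- def gen_dict(d_in, d_upd=None, k_del=None):
--     """Generates a dictionary.
--
--     This method is used to create new dictionaries based on existing ones and given changes to those existing ones.
--     Specifically, a new dictionary is based on the 'd_in' dictionary with values updated based on the 'd_upd'
--     dictionary and keys deleted based on the 'k_del' iterable.
--
--     Args:
--         d_in (Mapping[str, Any]): Original mapping.
--         d_upd (Mapping[str, Any], optional): Key-values to be set on the original mapping.
--         k_del (Iterable[str], optional): An iterable of keys to be removed from the original mapping.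
--
--     Returns:
--         Mapping: A shallow copy of the updated original mapping.
--
--     Notes:
--         A shallow copy of the dictionary is returned at this point.  That is to avoid creating unnecessary copies
--         of entities that might be stored as relations.  A more adaptive mechanism can be implemented later if
--         needed.
--
--     Todo:
--         Consider: https://stackoverflow.com/questions/38987/how-to-merge-two-dictionaries-in-a-single-expression
--     """
--
--     ret = d_in.copy()
--
--     if d_upd is not None:
--         ret.update(d_upd)
--
--     if k_del is not None and len(k_del) > 0:
--         for k in k_del:
--             if k in ret:
--                 del ret[k]
--
--     return ret
-- ===== SOURCE B (Python) =====
-- def gen_dict(d_in, d_upd=None, k_del=None):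
--     pending = dict(d_upd) if d_upd is not None else {}
--     drop = set(k_del) if k_del is not None else set()
--     out = []
--     for k, v in d_in.items():
--         if k not in drop:
--             out.append((k, pending.pop(k, v)))
--     for k, v in pending.items():
--         if k not in drop:
--             out.append((k, v))
--     return type(d_in)(out)
-- ===== Notes on version B (the rewrite author's own statement) =====
-- stated objective: alternative
-- what changed: Instead of A's copy-then-update-then-delete mutation of one dict, B builds the output list in a single pass over d_in (keeping each undropped key with its value looked up in, and consumed from, a pending updates dict) and then appends the leftover pending entries, constructing the result dict once at the end.
import Mathlib
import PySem

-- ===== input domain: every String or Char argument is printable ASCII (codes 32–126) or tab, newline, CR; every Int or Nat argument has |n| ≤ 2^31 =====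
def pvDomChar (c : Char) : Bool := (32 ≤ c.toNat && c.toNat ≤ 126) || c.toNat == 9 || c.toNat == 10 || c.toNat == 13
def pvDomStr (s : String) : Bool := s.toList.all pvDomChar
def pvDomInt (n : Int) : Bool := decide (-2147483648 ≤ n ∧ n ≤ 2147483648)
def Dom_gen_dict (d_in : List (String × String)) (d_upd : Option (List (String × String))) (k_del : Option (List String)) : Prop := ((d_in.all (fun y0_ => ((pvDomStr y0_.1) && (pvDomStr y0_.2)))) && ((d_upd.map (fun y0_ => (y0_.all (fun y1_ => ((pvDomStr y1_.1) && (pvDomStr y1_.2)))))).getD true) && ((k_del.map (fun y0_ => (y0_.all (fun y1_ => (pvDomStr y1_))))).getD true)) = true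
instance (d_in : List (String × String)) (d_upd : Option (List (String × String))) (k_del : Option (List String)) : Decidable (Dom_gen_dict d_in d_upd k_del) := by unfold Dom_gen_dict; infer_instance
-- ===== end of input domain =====

-- B builds the result in one pass over d_in (looking updates up and consuming them from a
-- pending dict) and then appends the leftover new entries — no copy/update/delete mutation (alternative decomposition).


-- ===== PORT A =====
-- ret = d_in.copy(); if d_upd is not None: ret.update(d_upd);
-- if k_del is not None and len(k_del) > 0: for k in k_del: if k in ret: del ret[k]
def gen_dict (d_in : List (String × String)) (d_upd : Option (List (String × String))) (k_del : Option (List String)) : List (String × String) :=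
  let ret : PySem.Dict String String := PySem.Dict.mk d_in
  let ret : PySem.Dict String String :=
    match d_upd with
    | some u => ret.update u
    | none   => ret
  let ret : PySem.Dict String String :=
    match k_del with
    | some ks =>
        if ks.length > 0 then
          ks.foldl (fun r k => if r.contains k then r.erase k else r) ret
        else ret
    | none   => ret
  ret.items

-- ===== PORT B =====
-- pending = dict(d_upd) if d_upd is not None else {}; drop = set(k_del) if k_del is not None else set()
-- out = []
-- for k, v in d_in.items():        # one pass: keep k with its updated value, consuming it from pending
--     if k not in drop: out.append((k, pending.pop(k, v)))
-- for k, v in pending.items():     # leftover new entries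
--     if k not in drop: out.append((k, v))
-- return type(d_in)(out)
def gen_dict_alt (d_in : List (String × String)) (d_upd : Option (List (String × String))) (k_del : Option (List String)) : List (String × String) :=
  let pending : PySem.Dict String String :=
    match d_upd with
    | some u => PySem.Dict.ofList u
    | none   => PySem.Dict.empty
  let drop : PySem.Set String :=
    match k_del with
    | some ks => PySem.Set.ofList ks
    | none    => PySem.Set.empty
  let st : List (String × String) × PySem.Dict String String :=
    d_in.foldl
      (fun st p =>
        if drop.contains p.1 then st
        else (st.1 ++ [(p.1, st.2.getD p.1 p.2)], st.2.erase p.1))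
      ([], pending)
  st.1 ++ st.2.items.filter (fun q => !(drop.contains q.1))

-- ===== PRECONDITION & SPEC =====
-- Pre_ excludes association lists whose keys repeat: they represent no Python dict
-- (every actual Python argument d_in, being a dict, satisfies it).
def Pre_gen_dict (d_in : List (String × String)) (d_upd : Option (List (String × String))) (k_del : Option (List String)) : Prop :=
  (d_in.map Prod.fst).Nodup
instance (d_in : List (String × String)) (d_upd : Option (List (String × String))) (k_del : Option (List String)) : Decidable (Pre_gen_dict d_in d_upd k_del) := by unfold Pre_gen_dict; infer_instance

def pvWitness_gen_dict : (List (String × String)) × (Option (List (String × String))) × Option (List String) :=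
  ([("a", "1"), ("b", "2")], some [("b", "3"), ("c", "4")], some ["a", "z"])

def Spec_gen_dict (d_in : List (String × String)) (d_upd : Option (List (String × String))) (k_del : Option (List String)) (out : List (String × String)) : Prop := out = gen_dict_alt d_in d_upd k_del
instance (d_in : List (String × String)) (d_upd : Option (List (String × String))) (k_del : Option (List String)) (out : List (String × String)) : Decidable (Spec_gen_dict d_in d_upd k_del out) := by unfold Spec_gen_dict; infer_instance

-- ===== CLAIM (what is proved, stated in full; the proofs are below) =====
def Claim_equal_gen_dict : Prop := ∀ (d_in : List (String × String)) (d_upd : Option (List (String × String))) (k_del : Option (List String)), Dom_gen_dict d_in d_upd k_del → Pre_gen_dict d_in d_upd k_del → Spec_gen_dict d_in d_upd k_del (gen_dict d_in d_upd k_del)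

-- ===== LEMMAS AND PROOFS =====


-- A's guarded delete step is an unconditional erase.
theorem step_eq_erase (r : PySem.Dict String String) (k : String) :
    (if r.contains k then r.erase k else r) = r.erase k := by
  by_cases h : r.contains k = true
  · simp [h]
  · rw [if_neg (by simp [h])]
    apply PySem.Dict.ext
    show r.items = r.items.filter _
    symm
    apply List.filter_eq_self.mpr
    intro p hp
    simp only [PySem.Dict.contains, List.any_eq_true, not_exists] at h
    push Not at h
    simpa using h p hp

-- Folding A's guarded delete over a key list is filtering out those keys.
theorem foldl_del_eq_filter (ks : List String) (m : PySem.Dict String String) :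
    (ks.foldl (fun r k => if r.contains k then r.erase k else r) m).items
      = m.items.filter (fun p => !(ks.contains p.1)) := by
  induction ks generalizing m with
  | nil => simp
  | cons k ks ih =>
      rw [List.foldl_cons, step_eq_erase, ih]
      show ((m.erase k).items).filter _ = _
      simp only [PySem.Dict.erase, List.filter_filter]
      apply List.filter_congr
      intro p _
      by_cases h : p.1 = k <;> simp [h]

-- Membership in the deletion set is membership in the key list.
theorem set_contains_eq (ks : List String) (x : String) :
    (PySem.Set.ofList ks).contains x = ks.contains x := by
  by_cases hx : x ∈ ks <;>
    simp [PySem.Set.contains, hx, PySem.Set.mem_ofList]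

-- A's whole delete phase (with its non-empty guard) equals a filter by the key set.
theorem delete_phase (ks : List String) (M : PySem.Dict String String) :
    (if ks.length > 0 then ks.foldl (fun r k => if r.contains k then r.erase k else r) M else M).items
      = M.items.filter (fun p => !((PySem.Set.ofList ks).contains p.1)) := by
  by_cases hlen : ks.length > 0
  · rw [if_pos hlen, foldl_del_eq_filter]
    apply List.filter_congr
    intro p _
    rw [set_contains_eq]
  · have hks : ks = [] := List.eq_nil_of_length_eq_zero (by omega)
    subst hks
    rw [if_neg hlen]
    simp [PySem.Set.ofList, PySem.Set.contains]

theorem mk_items (d : PySem.Dict String String) : PySem.Dict.mk d.items = d := rfl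

theorem get?_filter_ne (l : List (String × String)) (k x : String) (h : x ≠ k) :
    (PySem.Dict.mk (l.filter (fun p => !(p.1 == k)))).get? x = (PySem.Dict.mk l).get? x := by
  induction l with
  | nil => rfl
  | cons q l ih =>
      by_cases hq : q.1 = k
      · rw [List.filter_cons_of_neg (by simp [hq])]
        rw [ih, PySem.Dict.get?_mk_cons, if_neg (by simp [hq]; exact fun hkx => h hkx.symm)]
      · rw [List.filter_cons_of_pos (by simp [hq])]
        rw [PySem.Dict.get?_mk_cons, PySem.Dict.get?_mk_cons, ih]

theorem getD_erase_of_ne (d : PySem.Dict String String) (k x : String) (dflt : String)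
    (h : x ≠ k) : (d.erase k).getD x dflt = d.getD x dflt := by
  rw [PySem.Dict.getD_eq_get?_getD, PySem.Dict.getD_eq_get?_getD]
  congr 1
  have := get?_filter_ne d.items k x h
  rw [mk_items] at this
  exact this

theorem b_fold (drop : PySem.Set String) (l : List (String × String)) :
    ∀ (acc : List (String × String)) (e : PySem.Dict String String),
    (l.map Prod.fst).Nodup →
    (l.foldl
      (fun st p =>
        if drop.contains p.1 then st
        else (st.1 ++ [(p.1, st.2.getD p.1 p.2)], st.2.erase p.1))
      (acc, e))
    = (acc ++ (l.filter (fun p => !(drop.contains p.1))).map (fun p => (p.1, e.getD p.1 p.2)),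
       PySem.Dict.mk (e.items.filter
         (fun q => !(((l.filter (fun p => !(drop.contains p.1))).map Prod.fst).contains q.1)))) := by
  induction l with
  | nil =>
      intro acc e _
      simp [mk_items]
  | cons p l ih =>
      intro acc e hnd
      rw [List.map_cons, List.nodup_cons] at hnd
      obtain ⟨hp, hnd⟩ := hnd
      by_cases hdq : drop.contains p.1 = true
      · rw [List.foldl_cons, if_pos hdq, List.filter_cons_of_neg (by rw [hdq]; simp)]
        exact ih acc e hnd
      · have hfalse : drop.contains p.1 = false := by
          revert hdq; cases drop.contains p.1 <;> simp
        rw [List.foldl_cons, if_neg hdq,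
            List.filter_cons_of_pos (by rw [hfalse]; simp),
            ih (acc ++ [(p.1, e.getD p.1 p.2)]) (e.erase p.1) hnd]
        simp only [Prod.mk.injEq]
        constructor
        · rw [List.map_cons, List.append_assoc, List.singleton_append]
          congr 2
          apply List.map_congr_left
          intro q hq
          have hqne : q.1 ≠ p.1 := by
            intro heq
            exact hp (heq ▸ List.mem_map_of_mem (List.mem_of_mem_filter hq))
          rw [getD_erase_of_ne e p.1 q.1 q.2 hqne]
        · congr 1
          show List.filter _ (List.filter (fun q => !(q.1 == p.1)) e.items) = _
          rw [List.filter_filter]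
          apply List.filter_congr
          intro q _
          rw [Bool.and_comm]
          simp only [List.map_cons, List.contains_cons, Bool.not_or]

theorem update_snoc (d : PySem.Dict String String) (u : List (String × String)) (p : String × String) :
    d.update (u ++ [p]) = (d.update u).insert p.1 p.2 := by
  show (u ++ [p]).foldl _ d = _
  rw [List.foldl_append]
  rfl
theorem ofList_snoc (u : List (String × String)) (p : String × String) :
    PySem.Dict.ofList (u ++ [p]) = (PySem.Dict.ofList u).insert p.1 p.2 := by
  show (u ++ [p]).foldl _ _ = _
  rw [List.foldl_append]
  rfl
theorem contains_update (u : List (String × String)) (d : PySem.Dict String String) (k : String) :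
    (d.update u).contains k = (d.contains k || (PySem.Dict.ofList u).contains k) := by
  induction u using List.reverseRecOn generalizing d with
  | nil => simp [PySem.Dict.update, PySem.Dict.ofList, PySem.Dict.contains_empty]
  | append_singleton u p ih =>
      rw [update_snoc, ofList_snoc, PySem.Dict.contains_insert, PySem.Dict.contains_insert, ih]
      cases h1 : d.contains k <;> cases h2 : (k == p.1) <;> simp

theorem items_update_split (u : List (String × String)) (d : PySem.Dict String String) :
    (d.update u).items
      = d.items.map (fun p => (p.1, (PySem.Dict.ofList u).getD p.1 p.2))
        ++ (PySem.Dict.ofList u).items.filter (fun q => !(d.contains q.1)) := by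
  induction u using List.reverseRecOn with
  | nil =>
      show d.items = d.items.map _ ++ List.filter _ (PySem.Dict.empty.items)
      have h1 : (fun p : String × String => (p.1, (PySem.Dict.ofList ([] : List (String × String))).getD p.1 p.2)) = fun p : String × String => (p.1, p.2) := by
        funext x
        rw [show PySem.Dict.ofList ([] : List (String × String)) = PySem.Dict.empty from rfl, PySem.Dict.getD_empty]
      rw [h1]
      simp [PySem.Dict.empty]
  | append_singleton u p ih =>
      have hfun : ∀ x : String × String,
          (if x.1 == p.1 then (p.1, p.2) else (x.1, (PySem.Dict.ofList u).getD x.1 x.2))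
            = (x.1, ((PySem.Dict.ofList u).insert p.1 p.2).getD x.1 x.2) := by
        intro x
        rw [PySem.Dict.getD_insert]
        by_cases h : x.1 = p.1
        · simp [h]
        · simp [h]
      rw [update_snoc, ofList_snoc]
      by_cases hc1 : (PySem.Dict.ofList u).contains p.1 = true
      · have hcu : (d.update u).contains p.1 = true := by
          rw [contains_update]; simp [hc1]
        rw [PySem.Dict.items_insert_of_contains (d.update u) p.2 hcu, PySem.Dict.items_insert_of_contains (PySem.Dict.ofList u) p.2 hc1,
            ih, List.map_append, List.map_map, List.filter_map]
        congr 1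
        · apply List.map_congr_left
          intro x _
          exact hfun x
        · congr 1
          apply List.filter_congr
          intro q _
          show (!(d.contains q.1)) = !(d.contains (if q.1 == p.1 then (p.1, p.2) else q).1)
          by_cases hq : q.1 = p.1 <;> simp [hq]
      · have hc1' : (PySem.Dict.ofList u).contains p.1 = false := by
          revert hc1; cases (PySem.Dict.ofList u).contains p.1 <;> simp
        have hqneU : ∀ q ∈ (PySem.Dict.ofList u).items, q.1 ≠ p.1 := by
          intro q hq hqeq
          have : (PySem.Dict.ofList u).contains p.1 = true := by
            simp only [PySem.Dict.contains, List.any_eq_true]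
            exact ⟨q, hq, by simp [hqeq]⟩
          rw [hc1'] at this; exact absurd this (by simp)
        by_cases hc2 : d.contains p.1 = true
        · have hcu : (d.update u).contains p.1 = true := by
            rw [contains_update]; simp [hc2]
          rw [PySem.Dict.items_insert_of_contains (d.update u) p.2 hcu, ih, List.map_append, List.map_map,
              PySem.Dict.items_insert_of_not_contains (PySem.Dict.ofList u) p.2 hc1', List.filter_append]
          congr 1
          · apply List.map_congr_left
            intro x _
            exact hfun x
          · rw [show List.filter (fun q => !(d.contains q.1)) [(p.1, p.2)] = [] by simp [hc2]]
            rw [List.append_nil]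
            have hmapid : List.map (fun q => if q.1 == p.1 then (p.1, p.2) else q)
                (List.filter (fun q => !(d.contains q.1)) (PySem.Dict.ofList u).items)
              = List.map id (List.filter (fun q => !(d.contains q.1)) (PySem.Dict.ofList u).items) := by
              apply List.map_congr_left
              intro q hq
              have := hqneU q (List.mem_of_mem_filter hq)
              simp [this]
            rw [hmapid, List.map_id]
        · have hc2' : d.contains p.1 = false := by
            revert hc2; cases d.contains p.1 <;> simp
          have hcu : (d.update u).contains p.1 = false := by
            rw [contains_update, hc2', hc1']; rfl
          rw [PySem.Dict.items_insert_of_not_contains (d.update u) p.2 hcu, ih,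
              PySem.Dict.items_insert_of_not_contains (PySem.Dict.ofList u) p.2 hc1', List.filter_append]
          rw [show List.filter (fun q => !(d.contains q.1)) [(p.1, p.2)] = [(p.1, p.2)] by simp [hc2']]
          rw [List.append_assoc]
          congr 1
          apply List.map_congr_left
          intro x hx
          have hxne : x.1 ≠ p.1 := by
            intro hxeq
            have : d.contains p.1 = true := by
              simp only [PySem.Dict.contains, List.any_eq_true]
              exact ⟨x, hx, by simp [hxeq]⟩
            rw [hc2'] at this; exact absurd this (by simp)
          rw [show ((PySem.Dict.ofList u).insert p.1 p.2).getD x.1 x.2 = (PySem.Dict.ofList u).getD x.1 x.2 from by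
            rw [PySem.Dict.getD_insert]; simp [hxne]]

-- The merged-then-filtered items of A coincide with B's one-pass construction.
theorem main_eq (d_in : List (String × String)) (u : List (String × String)) (ks : List String)
    (h : (d_in.map Prod.fst).Nodup) :
    ((PySem.Dict.mk d_in).update u).items.filter (fun q => !((PySem.Set.ofList ks).contains q.1))
      = (d_in.foldl
          (fun st p =>
            if (PySem.Set.ofList ks).contains p.1 then st
            else (st.1 ++ [(p.1, st.2.getD p.1 p.2)], st.2.erase p.1))
          (([] : List (String × String)), PySem.Dict.ofList u)).1
        ++ ((d_in.foldl
          (fun st p =>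
            if (PySem.Set.ofList ks).contains p.1 then st
            else (st.1 ++ [(p.1, st.2.getD p.1 p.2)], st.2.erase p.1))
          (([] : List (String × String)), PySem.Dict.ofList u)).2).items.filter
            (fun q => !((PySem.Set.ofList ks).contains q.1)) := by
  rw [b_fold (PySem.Set.ofList ks) d_in [] (PySem.Dict.ofList u) h]
  dsimp only
  rw [items_update_split u (PySem.Dict.mk d_in), List.filter_append, List.filter_map,
      List.nil_append, List.filter_filter, List.filter_filter]
  congr 1
  congr 1
  funext q
  by_cases hdq : q.1 ∈ ks
  · have h1 : (PySem.Set.ofList ks).contains q.1 = true := by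
      simp [PySem.Set.contains, PySem.Set.mem_ofList, hdq]
    rw [h1]
    simp
  · have h1 : (PySem.Set.ofList ks).contains q.1 = false := by
      simp [PySem.Set.contains, PySem.Set.mem_ofList, hdq]
    rw [h1]
    simp only [Bool.not_false, Bool.true_and]
    congr 1
    by_cases hm : q.1 ∈ d_in.map Prod.fst
    · obtain ⟨r, hr, hre⟩ := List.mem_map.mp hm
      have h2 : (PySem.Dict.mk d_in).contains q.1 = true := by
        simp only [PySem.Dict.contains, List.any_eq_true]
        exact ⟨r, hr, by simp [hre]⟩
      have h3 : ((d_in.filter (fun p => !((PySem.Set.ofList ks).contains p.1))).map Prod.fst).contains q.1 = true := by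
        simp only [List.contains_iff_exists_mem_beq, List.mem_map, List.mem_filter]
        refine ⟨q.1, ⟨r, ⟨hr, ?_⟩, hre⟩, by simp⟩
        simp [PySem.Set.contains, PySem.Set.mem_ofList, hre, hdq]
      rw [h2, h3]
    · have h2 : (PySem.Dict.mk d_in).contains q.1 = false := by
        rw [Bool.eq_false_iff]
        intro hany
        simp only [PySem.Dict.contains, List.any_eq_true] at hany
        obtain ⟨r, hr, hre⟩ := hany
        exact hm (List.mem_map.mpr ⟨r, hr, by simpa using hre⟩)
      have h3 : ((d_in.filter (fun p => !((PySem.Set.ofList ks).contains p.1))).map Prod.fst).contains q.1 = false := by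
        rw [Bool.eq_false_iff]
        intro hc
        rw [List.contains_iff_exists_mem_beq] at hc
        obtain ⟨a, ha, hae⟩ := hc
        obtain ⟨r, hr, hre⟩ := List.mem_map.mp ha
        have haq : q.1 = a := by simpa using hae
        exact hm (List.mem_map.mpr ⟨r, List.mem_of_mem_filter hr, by rw [hre, ← haq]⟩)
      rw [h2, h3]

-- The empty deletion set filters nothing.
theorem none_filter (l : List (String × String)) :
    l.filter (fun q => !((PySem.Set.ofList ([] : List String)).contains q.1)) = l := by
  apply List.filter_eq_self.mpr
  intro p _
  simp [PySem.Set.ofList, PySem.Set.contains]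

-- ===== VERDICT (by name: the statement is the Claim_ definition above) =====
theorem gen_dict_spec : Claim_equal_gen_dict := by
  intro d_in d_upd k_del _ hpre
  unfold Spec_gen_dict gen_dict gen_dict_alt
  cases d_upd with
  | some u =>
      cases k_del with
      | some ks =>
          rw [delete_phase ks ((PySem.Dict.mk d_in).update u)]
          exact main_eq d_in u ks hpre
      | none =>
          have h := main_eq d_in u [] hpre
          rw [none_filter] at h
          exact h
  | none =>
      cases k_del with
      | some ks =>
          rw [delete_phase ks (PySem.Dict.mk d_in)]
          exact main_eq d_in [] ks hpre
      | none =>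
          have h := main_eq d_in [] [] hpre
          rw [none_filter] at h
          exact h
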